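-- pv_equiv track=rewrite | github.com/KolobokV/erpv2-core.v3 | backend/app_bak_20251224_003957/dev_create_test_process_client3.py | compute_instance_status_from_steps
-- ===== SOURCE A (Python) =====
-- from typing import Any, Dict, List
--
-- def compute_instance_status_from_steps(steps: List[Dict[str, Any]]) -> str:
--     if not steps:
--         return "open"
--     has_error = any((s.get("status") or "").lower() in ("error", "failed") for s in steps)
--     if has_error:
--         return "error"
--     all_completed = all((s.get("status") or "").lower() == "completed" for s in steps)
--     if all_completed:
--         return "completed"
--     has_waiting = any((s.get("status") or "").lower() in ("waiting", "planned") for s in steps)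
--     if has_waiting:
--         return "waiting"
--     return "open"
-- ===== SOURCE B (Python) =====
-- def compute_instance_status_from_steps(steps):
--     if not steps:
--         return "open"
--     has_error = False
--     all_completed = True
--     has_waiting = False
--     for s in steps:
--         st = (s.get("status") or "").lower()
--         if st in ("error", "failed"):
--             has_error = True
--         if st != "completed":
--             all_completed = False
--         if st in ("waiting", "planned"):
--             has_waiting = True
--     if has_error:
--         return "error"
--     if all_completed:
--         return "completed"
--     if has_waiting:
--         return "waiting"
--     return "open"
-- ===== Notes on version B (the rewrite author's own statement) =====
-- stated objective: alternative
-- what changed: Replaced A's three separate any/all scans over the step list by a single accumulating pass that maintains has_error/all_completed/has_waiting flags and applies the same priority cascade afterwards.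
import Mathlib
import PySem

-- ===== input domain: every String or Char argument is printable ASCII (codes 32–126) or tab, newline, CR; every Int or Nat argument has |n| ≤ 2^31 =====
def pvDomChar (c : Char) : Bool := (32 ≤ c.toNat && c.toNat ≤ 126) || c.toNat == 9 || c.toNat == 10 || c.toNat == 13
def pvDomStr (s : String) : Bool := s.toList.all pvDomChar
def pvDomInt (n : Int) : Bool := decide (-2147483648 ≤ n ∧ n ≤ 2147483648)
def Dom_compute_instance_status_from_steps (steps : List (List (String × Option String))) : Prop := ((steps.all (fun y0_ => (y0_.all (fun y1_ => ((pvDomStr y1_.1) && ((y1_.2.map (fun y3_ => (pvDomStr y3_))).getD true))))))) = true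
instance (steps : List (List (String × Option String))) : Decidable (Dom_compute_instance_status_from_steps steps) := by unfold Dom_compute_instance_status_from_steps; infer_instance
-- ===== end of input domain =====

-- B merges A's three separate any/all scans into one accumulating pass with the same priority cascade (alternative decomposition, same result).


-- ===== PORT A =====
-- (s.get("status") or "").lower() — 'or' yields "" when the key is missing, the value is None, or the value is "";
-- in every such case the result below is "" too, so the single match is exact.
def pvStatusA (s : List (String × Option String)) : String :=
  PySem.Str.lower (match (PySem.Dict.mk s).get? "status" with
    | some (some v) => v
    | _ => "")

def compute_instance_status_from_steps (steps : List (List (String × Option String))) : String :=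
  if steps = [] then "open"
  else
    let has_error := steps.any (fun s => pvStatusA s = "error" || pvStatusA s = "failed")
    if has_error then "error"
    else
      let all_completed := steps.all (fun s => pvStatusA s = "completed")
      if all_completed then "completed"
      else
        let has_waiting := steps.any (fun s => pvStatusA s = "waiting" || pvStatusA s = "planned")
        if has_waiting then "waiting"
        else "open"

-- ===== PORT B =====
def pvStatusB (s : List (String × Option String)) : String :=
  PySem.Str.lower (match (PySem.Dict.mk s).get? "status" with
    | some (some v) => v
    | _ => "")

-- one pass: (has_error, all_completed, has_waiting)
def pvStepB (acc : Bool × Bool × Bool) (s : List (String × Option String)) : Bool × Bool × Bool :=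
  let st := pvStatusB s
  (acc.1 || (st = "error" || st = "failed"),
   acc.2.1 && st = "completed",
   acc.2.2 || (st = "waiting" || st = "planned"))

def compute_instance_status_from_steps_alt (steps : List (List (String × Option String))) : String :=
  if steps = [] then "open"
  else
    let flags := steps.foldl pvStepB (false, true, false)
    if flags.1 then "error"
    else if flags.2.1 then "completed"
    else if flags.2.2 then "waiting"
    else "open"

-- ===== PRECONDITION & SPEC =====
def Spec_compute_instance_status_from_steps (steps : List (List (String × Option String))) (out : String) : Prop := out = compute_instance_status_from_steps_alt steps
instance (steps : List (List (String × Option String))) (out : String) : Decidable (Spec_compute_instance_status_from_steps steps out) := by unfold Spec_compute_instance_status_from_steps; infer_instance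

-- ===== CLAIM (what is proved, stated in full; the proofs are below) =====
def Claim_equal_compute_instance_status_from_steps : Prop := ∀ (steps : List (List (String × Option String))), Dom_compute_instance_status_from_steps steps → Spec_compute_instance_status_from_steps steps (compute_instance_status_from_steps steps)

-- ===== LEMMAS AND PROOFS =====
theorem pvFoldB_eq (steps : List (List (String × Option String))) (a b c : Bool) :
    steps.foldl pvStepB (a, b, c) =
      (a || steps.any (fun s => pvStatusB s = "error" || pvStatusB s = "failed"),
       b && steps.all (fun s => pvStatusB s = "completed"),
       c || steps.any (fun s => pvStatusB s = "waiting" || pvStatusB s = "planned")) := by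
  induction steps generalizing a b c with
  | nil => simp
  | cons h t ih =>
    simp only [List.foldl_cons, List.any_cons, List.all_cons, pvStepB, ih]
    simp [Bool.or_assoc, Bool.and_assoc]

-- ===== VERDICT (by name: the statement is the Claim_ definition above) =====
theorem compute_instance_status_from_steps_spec : Claim_equal_compute_instance_status_from_steps := by
  intro steps _
  show _ = _
  unfold compute_instance_status_from_steps compute_instance_status_from_steps_alt
  by_cases hnil : steps = []
  · simp [hnil]
  · simp only [if_neg hnil, pvFoldB_eq, Bool.false_or, Bool.true_and]
    have hst : pvStatusA = pvStatusB := rfl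
    rw [hst]
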